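-- pv_equiv track=rewrite | github.com/nguyenanhduc09/top_speed | docs/render_docs.py | normalize_toc_block
-- ===== SOURCE A (Python) =====
-- def normalize_toc_block(text: str) -> str:
--     """Convert plain link lines under '## Table of Contents' into markdown list items."""
--     lines = text.splitlines()
--     if not lines:
--         return text
--
--     out: list[str] = []
--     i = 0
--     while i < len(lines):
--         line = lines[i]
--         out.append(line)
--
--         if line.strip() != "## Table of Contents":
--             i += 1
--             continue
--
--         i += 1
--         while i < len(lines) and lines[i].strip() == "":
--             out.append(lines[i])
--             i += 1
--
--         toc_lines: list[str] = []
--         while i < len(lines) and lines[i].strip() != "":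
--             toc_lines.append(lines[i].strip())
--             i += 1
--
--         looks_like_toc = bool(toc_lines) and all(
--             item.startswith("[") and "](" in item and item.endswith(")")
--             for item in toc_lines
--         )
--
--         if looks_like_toc:
--             out.extend(f"- {item}" for item in toc_lines)
--         else:
--             out.extend(toc_lines)
--
--     result = "\n".join(out)
--     if text.endswith("\n"):
--         result += "\n"
--     return result
-- ===== SOURCE B (Python) =====
-- def normalize_toc_block(text: str) -> str:
--     """Single pass state machine: NORMAL / AFTER_HEADER / COLLECTING with a paragraph buffer."""
--     lines = text.splitlines()
--     if not lines:
--         return text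
--
--     def flush(buf, out):
--         if buf and all(x.startswith("[") and "](" in x and x.endswith(")") for x in buf):
--             out.extend(f"- {x}" for x in buf)
--         else:
--             out.extend(buf)
--
--     NORMAL, AFTER_HEADER, COLLECTING = 0, 1, 2
--     state = NORMAL
--     buf: list[str] = []
--     out: list[str] = []
--     for line in lines:
--         if state == NORMAL:
--             out.append(line)
--             if line.strip() == "## Table of Contents":
--                 state = AFTER_HEADER
--         elif state == AFTER_HEADER:
--             if line.strip() == "":
--                 out.append(line)
--             else:
--                 buf = [line.strip()]
--                 state = COLLECTING
--         else:  # COLLECTING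
--             if line.strip() == "":
--                 flush(buf, out)
--                 buf = []
--                 out.append(line)
--                 state = NORMAL
--             else:
--                 buf.append(line.strip())
--     if state == COLLECTING:
--         flush(buf, out)
--
--     result = "\n".join(out)
--     if text.endswith("\n"):
--         result += "\n"
--     return result
-- ===== Notes on version B (the rewrite author's own statement) =====
-- stated objective: alternative
-- what changed: Replaced A's index-driven outer while loop with two nested skip-ahead inner loops by a single for-line pass driven by a three-state machine (NORMAL / AFTER_HEADER / COLLECTING) with an explicit paragraph buffer that is flushed on a blank line or at end of input.
import Mathlib
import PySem

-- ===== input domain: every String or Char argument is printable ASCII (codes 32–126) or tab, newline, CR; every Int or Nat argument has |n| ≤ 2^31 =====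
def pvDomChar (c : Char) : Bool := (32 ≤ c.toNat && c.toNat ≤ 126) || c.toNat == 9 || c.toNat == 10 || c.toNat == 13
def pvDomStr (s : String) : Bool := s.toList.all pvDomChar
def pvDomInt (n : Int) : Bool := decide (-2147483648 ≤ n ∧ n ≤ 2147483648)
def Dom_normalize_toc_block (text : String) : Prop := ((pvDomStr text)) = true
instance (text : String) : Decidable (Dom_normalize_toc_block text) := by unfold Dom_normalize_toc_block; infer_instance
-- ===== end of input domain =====

-- B rewrites A's index-driven loop with two inner skip loops as a single pass over the
-- lines driven by a three-state machine with an explicit paragraph buffer (objective: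
-- alternative decomposition, same linear cost).

-- ===== PORT A =====
-- inner while loop "while i < len(lines) and lines[i].strip() == ''": returns (the blank
-- lines appended verbatim, the remaining lines)
def pvCollectBlanks : List String → List String × List String
  | [] => ([], [])
  | x :: xs =>
    if PySem.Str.strip x = "" then
      let r := pvCollectBlanks xs
      (x :: r.1, r.2)
    else ([], x :: xs)

-- inner while loop "while i < len(lines) and lines[i].strip() != ''": returns
-- (toc_lines, i.e. the stripped non-blank lines, and the remaining lines)
def pvCollectToc : List String → List String × List String
  | [] => ([], [])
  | x :: xs =>
    if PySem.Str.strip x = "" then ([], x :: xs)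
    else
      let r := pvCollectToc xs
      (PySem.Str.strip x :: r.1, r.2)

theorem pvCollectBlanks_len : ∀ ls : List String, (pvCollectBlanks ls).2.length ≤ ls.length := by
  intro ls
  induction ls with
  | nil => simp [pvCollectBlanks]
  | cons x xs ih =>
    simp only [pvCollectBlanks]
    split
    · simp; omega
    · simp

theorem pvCollectToc_len : ∀ ls : List String, (pvCollectToc ls).2.length ≤ ls.length := by
  intro ls
  induction ls with
  | nil => simp [pvCollectToc]
  | cons x xs ih =>
    simp only [pvCollectToc]
    split
    · simp
    · simp; omega

def pvLooksLikeToc (toc : List String) : Bool :=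
  !toc.isEmpty && toc.all (fun item =>
    PySem.Str.startswith item "[" && PySem.Str.isIn "](" item && PySem.Str.endswith item ")")

-- the outer while loop of A, one iteration per chunk
def pvGoA : List String → List String
  | [] => []
  | line :: rest =>
    if PySem.Str.strip line ≠ "## Table of Contents" then
      line :: pvGoA rest
    else
      let p := pvCollectBlanks rest
      let q := pvCollectToc p.2
      line :: (p.1 ++
        (if pvLooksLikeToc q.1 then q.1.map (fun item => "- " ++ item) else q.1) ++
        pvGoA q.2)
termination_by ls => ls.length
decreasing_by
  · simp
  · have h1 := pvCollectBlanks_len rest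
    have h2 := pvCollectToc_len (pvCollectBlanks rest).2
    simp only [List.length_cons]
    omega

def normalize_toc_block (text : String) : String :=
  let lines := PySem.Str.splitlines text
  if lines.isEmpty then text
  else
    let result := PySem.Str.join "\n" (pvGoA lines)
    if PySem.Str.endswith text "\n" then result ++ "\n" else result

-- ===== PORT B =====
inductive PvState
  | normal
  | afterHeader
  | collecting : List String → PvState

def pvIsLink (x : String) : Bool :=
  PySem.Str.startswith x "[" && PySem.Str.isIn "](" x && PySem.Str.endswith x ")"

-- flush(buf, out): what gets appended to out for the buffered paragraph
def pvFlush (buf : List String) : List String :=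
  if !buf.isEmpty && buf.all pvIsLink then buf.map (fun x => "- " ++ x) else buf

-- the single "for line in lines" loop, state and buffer explicit
def pvGoB : PvState → List String → List String
  | .normal, [] => []
  | .normal, line :: rest =>
    line :: pvGoB (if PySem.Str.strip line = "## Table of Contents" then .afterHeader else .normal) rest
  | .afterHeader, [] => []
  | .afterHeader, line :: rest =>
    if PySem.Str.strip line = "" then line :: pvGoB .afterHeader rest
    else pvGoB (.collecting [PySem.Str.strip line]) rest
  | .collecting buf, [] => pvFlush buf
  | .collecting buf, line :: rest =>
    if PySem.Str.strip line = "" then pvFlush buf ++ line :: pvGoB .normal rest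
    else pvGoB (.collecting (buf ++ [PySem.Str.strip line])) rest

def normalize_toc_block_alt (text : String) : String :=
  let lines := PySem.Str.splitlines text
  if lines.isEmpty then text
  else
    let result := PySem.Str.join "\n" (pvGoB .normal lines)
    if PySem.Str.endswith text "\n" then result ++ "\n" else result

-- ===== PRECONDITION & SPEC =====
def Spec_normalize_toc_block (text : String) (out : String) : Prop := out = normalize_toc_block_alt text
instance (text : String) (out : String) : Decidable (Spec_normalize_toc_block text out) := by unfold Spec_normalize_toc_block; infer_instance

-- ===== CLAIM (what is proved, stated in full; the proofs are below) =====
def Claim_equal_normalize_toc_block : Prop := ∀ (text : String), Dom_normalize_toc_block text → Spec_normalize_toc_block text (normalize_toc_block text)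

-- ===== LEMMAS AND PROOFS =====

-- continuation of B once the machine leaves the collecting state (the terminating blank
-- line, if any, is handled in NORMAL state)
def pvCont : List String → List String
  | [] => []
  | y :: r => y :: pvGoB .normal r

-- state the machine enters on the first non-blank line after the header
def pvStart : List String → List String
  | [] => []
  | x :: r => pvGoB (.collecting [PySem.Str.strip x]) r

theorem pvCollectBlanks_head : ∀ (ls : List String) x r,
    (pvCollectBlanks ls).2 = x :: r → PySem.Str.strip x ≠ "" := by
  intro ls
  induction ls with
  | nil => intro x r h; simp [pvCollectBlanks] at h
  | cons y ys ih =>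
    intro x r h
    by_cases hy : PySem.Str.strip y = ""
    · simp only [pvCollectBlanks, if_pos hy] at h
      exact ih x r h
    · simp only [pvCollectBlanks, if_neg hy] at h
      obtain ⟨h1, h2⟩ := List.cons.injEq y ys x r ▸ h
      exact h1 ▸ hy

theorem pvCollectToc_head : ∀ (ls : List String) x r,
    (pvCollectToc ls).2 = x :: r → PySem.Str.strip x = "" := by
  intro ls
  induction ls with
  | nil => intro x r h; simp [pvCollectToc] at h
  | cons y ys ih =>
    intro x r h
    by_cases hy : PySem.Str.strip y = ""
    · simp only [pvCollectToc, if_pos hy] at h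
      obtain ⟨h1, h2⟩ := List.cons.injEq y ys x r ▸ h
      exact h1 ▸ hy
    · simp only [pvCollectToc, if_neg hy] at h
      exact ih x r h

theorem pvFlush_eq (toc : List String) :
    (if pvLooksLikeToc toc then toc.map (fun item => "- " ++ item) else toc) = pvFlush toc := by
  simp [pvFlush, pvLooksLikeToc, pvIsLink]

theorem pvGoB_blanks : ∀ ls : List String,
    pvGoB .afterHeader ls = (pvCollectBlanks ls).1 ++ pvStart (pvCollectBlanks ls).2 := by
  intro ls
  induction ls with
  | nil => simp [pvGoB, pvCollectBlanks, pvStart]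
  | cons x xs ih =>
    by_cases hx : PySem.Str.strip x = ""
    · simp only [pvGoB, if_pos hx, pvCollectBlanks, ih]
      simp
    · simp only [pvGoB, if_neg hx, pvCollectBlanks]
      simp [pvStart]

theorem pvGoB_collect : ∀ (ls : List String) (buf : List String),
    pvGoB (.collecting buf) ls =
      pvFlush (buf ++ (pvCollectToc ls).1) ++ pvCont (pvCollectToc ls).2 := by
  intro ls
  induction ls with
  | nil => intro buf; simp [pvGoB, pvCollectToc, pvCont]
  | cons x xs ih =>
    intro buf
    by_cases hx : PySem.Str.strip x = ""
    · simp only [pvGoB, if_pos hx, pvCollectToc]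
      simp [pvCont]
    · simp only [pvGoB, if_neg hx, pvCollectToc]
      simp only [ih (buf ++ [PySem.Str.strip x])]
      simp

theorem pvHeader_ne_blank : ("" : String) ≠ "## Table of Contents" := by decide

theorem pvCont_eq (r : List String)
    (h : ∀ y t, r = y :: t → PySem.Str.strip y = "") : pvCont r = pvGoB .normal r := by
  cases r with
  | nil => simp [pvCont, pvGoB]
  | cons y t =>
    have hy : PySem.Str.strip y = "" := h y t rfl
    simp [pvCont, pvGoB, hy, Ne.symm pvHeader_ne_blank]

theorem pvGoA_eq_pvGoB : ∀ ls : List String, pvGoA ls = pvGoB .normal ls := by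
  intro ls
  induction ls using pvGoA.induct with
  | case1 => simp [pvGoA, pvGoB]
  | case2 line rest h ih =>
    rw [pvGoA, if_pos h]
    have h' : ¬ PySem.Str.strip line = "## Table of Contents" := by
      intro hc; exact h hc
    simp [pvGoB, h', ih]
  | case3 line rest h p q ih =>
    have hline : PySem.Str.strip line = "## Table of Contents" := by
      by_contra hc; exact h hc
    rw [pvGoA, if_neg h]
    simp only [pvGoB, if_pos hline, pvGoB_blanks]
    rcases hb : (pvCollectBlanks rest).2 with _ | ⟨x, r⟩
    · simp only [pvStart, pvCollectToc, pvFlush_eq]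
      simp [pvFlush, pvGoA]
    · have hx : PySem.Str.strip x ≠ "" := pvCollectBlanks_head rest x r hb
      have hcont : pvCont (pvCollectToc r).2 = pvGoB .normal (pvCollectToc r).2 :=
        pvCont_eq _ (fun y t ht => pvCollectToc_head r y t ht)
      simp only [q, p, hb, pvCollectToc, if_neg hx] at ih
      simp only [pvStart, pvGoB_collect, pvCollectToc, if_neg hx, pvFlush_eq]
      rw [ih, hcont]
      simp

-- ===== VERDICT (by name: the statement is the Claim_ definition above) =====
theorem normalize_toc_block_spec : Claim_equal_normalize_toc_block := by
  intro text _
  unfold Spec_normalize_toc_block normalize_toc_block normalize_toc_block_alt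
  simp only [pvGoA_eq_pvGoB]
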